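-- pv_equiv track=rewrite | github.com/YarikMR/affect_ml | utils.py | sentence_strength
-- ===== SOURCE A (Python) =====
-- import collections
-- from typing import Dict
--
-- def sentence_strength(sentence: str, lexicon: Dict[str, list]) -> list:
--     emotion_words_count = collections.defaultdict(lambda: 0)
--     for word in sentence.split():
--         for key, value in lexicon.items():
--             if word in set(value):
--                 emotion_words_count[key] += 1
--     if emotion_words_count.values():
--         return max(emotion_words_count.values())
--     return 0
-- ===== SOURCE B (Python) =====
-- def sentence_strength(sentence: str, lexicon) -> int:
--     # Reverse index: word -> list of emotion keys whose word-list contains it,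
--     # built once; then a single pass over the sentence's words.
--     index = {}
--     for key, value in lexicon.items():
--         for word in dict.fromkeys(value):
--             index.setdefault(word, []).append(key)
--     counts = {}
--     for word in sentence.split():
--         for key in index.get(word, []):
--             counts[key] = counts.get(key, 0) + 1
--     return max(counts.values(), default=0)
-- ===== Notes on version B (the rewrite author's own statement) =====
-- stated objective: alternative
-- what changed: B precomputes a word-to-emotion-keys reverse index from the lexicon once, then makes a single pass over the sentence's words incrementing only the matched keys and takes max with default 0, instead of rebuilding set(value) and scanning the whole lexicon for every word; it trades the per-word lexicon scan for an upfront index build.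
import Mathlib
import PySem

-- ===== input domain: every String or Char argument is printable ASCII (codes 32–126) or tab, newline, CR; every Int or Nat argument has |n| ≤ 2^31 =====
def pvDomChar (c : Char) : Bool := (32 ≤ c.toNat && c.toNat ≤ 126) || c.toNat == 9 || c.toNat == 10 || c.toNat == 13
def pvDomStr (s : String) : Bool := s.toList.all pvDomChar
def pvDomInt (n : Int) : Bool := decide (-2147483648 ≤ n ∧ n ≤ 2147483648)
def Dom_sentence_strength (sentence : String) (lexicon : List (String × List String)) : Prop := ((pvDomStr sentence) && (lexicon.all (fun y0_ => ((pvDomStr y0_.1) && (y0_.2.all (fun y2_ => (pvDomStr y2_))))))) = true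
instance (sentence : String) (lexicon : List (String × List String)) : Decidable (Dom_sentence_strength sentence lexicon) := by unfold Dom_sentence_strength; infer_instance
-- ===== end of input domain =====

-- B replaces A's per-word scan of the whole lexicon (rebuilding set(value) each time) by a
-- word→keys reverse index built once from the lexicon, then one pass over the sentence's words.

-- ===== PORT A =====
def sentence_strength (sentence : String) (lexicon : List (String × List String)) : Int :=
  -- emotion_words_count = defaultdict(int); for word in sentence.split(): for key, value in
  -- lexicon.items(): if word in set(value): emotion_words_count[key] += 1
  let d : PySem.Dict String Int :=
    (PySem.Str.split₀ sentence).foldl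
      (fun d w => lexicon.foldl
        (fun d kv =>
          if PySem.Set.contains (PySem.Set.ofList kv.2) w then d.modify kv.1 0 (· + 1) else d)
        d)
      PySem.Dict.empty
  -- if emotion_words_count.values(): return max(...) ; return 0
  if d.values ≠ [] then (PySem.List.max? d.values (fun x => x)).getD 0 else 0

-- ===== PORT B =====
def sentence_strength_alt (sentence : String) (lexicon : List (String × List String)) : Int :=
  -- index = {}; for key, value in lexicon.items(): for word in dict.fromkeys(value):
  --   index.setdefault(word, []).append(key)   (setdefault+append ≡ modify with default [])
  let index : PySem.Dict String (List String) :=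
    lexicon.foldl
      (fun idx kv =>
        (PySem.List.dedup kv.2).foldl (fun idx w => idx.modify w [] (· ++ [kv.1])) idx)
      PySem.Dict.empty
  -- counts = {}; for word in sentence.split(): for key in index.get(word, []):
  --   counts[key] = counts.get(key, 0) + 1
  let counts : PySem.Dict String Int :=
    (PySem.Str.split₀ sentence).foldl
      (fun d w => (index.getD w []).foldl (fun d k => d.insert k (d.getD k 0 + 1)) d)
      PySem.Dict.empty
  -- return max(counts.values(), default=0)
  PySem.List.maxD counts.values (fun x => x) 0

-- ===== PRECONDITION & SPEC =====
def Spec_sentence_strength (sentence : String) (lexicon : List (String × List String)) (out : Int) : Prop := out = sentence_strength_alt sentence lexicon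
instance (sentence : String) (lexicon : List (String × List String)) (out : Int) : Decidable (Spec_sentence_strength sentence lexicon out) := by unfold Spec_sentence_strength; infer_instance

-- ===== CLAIM (what is proved, stated in full; the proofs are below) =====
def Claim_equal_sentence_strength : Prop := ∀ (sentence : String) (lexicon : List (String × List String)), Dom_sentence_strength sentence lexicon → Spec_sentence_strength sentence lexicon (sentence_strength sentence lexicon)

-- ===== LEMMAS AND PROOFS =====

-- the keys (in lexicon order, with multiplicity) whose word list contains w
def keysFor (l : List (String × List String)) (w : String) : List String :=
  (l.filter (fun kv => decide (w ∈ kv.2))).map Prod.fst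

theorem keysFor_cons_mem (kv : String × List String) (rest : List (String × List String))
    (w : String) (h : w ∈ kv.2) : keysFor (kv :: rest) w = kv.1 :: keysFor rest w := by
  simp [keysFor, h]

theorem keysFor_cons_not_mem (kv : String × List String) (rest : List (String × List String))
    (w : String) (h : w ∉ kv.2) : keysFor (kv :: rest) w = keysFor rest w := by
  simp [keysFor, h]

-- A's inner loop over the lexicon = the same increments, driven by keysFor
theorem foldA_eq_keysFor (l : List (String × List String)) (w : String) (d : PySem.Dict String Int) :
    l.foldl
      (fun d kv =>
        if PySem.Set.contains (PySem.Set.ofList kv.2) w then d.modify kv.1 0 (· + 1) else d) d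
    = (keysFor l w).foldl (fun d k => d.modify k 0 (· + 1)) d := by
  induction l generalizing d with
  | nil => rfl
  | cons kv rest ih =>
    by_cases h : w ∈ kv.2
    · have hc : PySem.Set.contains (PySem.Set.ofList kv.2) w = true := by
        rw [PySem.Set.contains_iff]; exact (PySem.Set.mem_ofList kv.2 w).mpr h
      rw [List.foldl_cons, keysFor_cons_mem kv rest w h, List.foldl_cons, hc, if_pos rfl, ih]
    · have hc : PySem.Set.contains (PySem.Set.ofList kv.2) w = false := by
        rw [Bool.eq_false_iff]
        intro hcon
        exact h ((PySem.Set.mem_ofList kv.2 w).mp ((PySem.Set.contains_iff _ _).mp hcon))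
      rw [List.foldl_cons, keysFor_cons_not_mem kv rest w h, hc, if_neg Bool.false_ne_true, ih]

-- a build loop over words not containing c leaves index[c] unchanged
theorem getD_fold_not_mem (l : List String) (k : String) (c : String)
    (idx : PySem.Dict String (List String)) (h : c ∉ l) :
    (l.foldl (fun idx w => idx.modify w [] (· ++ [k])) idx).getD c []
    = idx.getD c [] := by
  induction l generalizing idx with
  | nil => rfl
  | cons x xs ih =>
    simp only [List.foldl_cons]
    rw [ih _ (fun hm => h (List.mem_cons_of_mem _ hm)),
        PySem.Dict.getD_modify_of_ne _ _ _ (fun he => h (by rw [he]; exact List.mem_cons_self))]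

-- one lexicon entry's build loop appends its key to index[c] iff c occurs in its word list
theorem getD_fold_nodup (l : List String) (hnd : l.Nodup) (k : String) (c : String)
    (idx : PySem.Dict String (List String)) :
    (l.foldl (fun idx w => idx.modify w [] (· ++ [k])) idx).getD c []
    = idx.getD c [] ++ (if c ∈ l then [k] else []) := by
  induction l generalizing idx with
  | nil => simp
  | cons x xs ih =>
    rcases List.nodup_cons.mp hnd with ⟨hx, hxs⟩
    simp only [List.foldl_cons]
    by_cases h : x = c
    · subst h
      rw [getD_fold_not_mem _ _ _ _ hx, PySem.Dict.getD_modify_self]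
      simp
    · rw [ih hxs, PySem.Dict.getD_modify_of_ne _ _ _ (fun he => h he.symm)]
      have hne : ¬ c = x := fun he => h he.symm
      simp [List.mem_cons, hne]

-- the reverse index looked up at c gives exactly keysFor
theorem getD_index (l : List (String × List String)) (c : String)
    (idx : PySem.Dict String (List String)) :
    (l.foldl
       (fun idx kv =>
         (PySem.List.dedup kv.2).foldl (fun idx w => idx.modify w [] (· ++ [kv.1])) idx)
       idx).getD c []
    = idx.getD c [] ++ keysFor l c := by
  induction l generalizing idx with
  | nil => simp [keysFor]
  | cons kv rest ih =>
    simp only [List.foldl_cons]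
    rw [ih, getD_fold_nodup _ (by rw [PySem.List.dedup_eq_ofList]; exact PySem.Set.nodup_ofList kv.2) kv.1 c idx]
    by_cases h : c ∈ kv.2
    · have hm : c ∈ PySem.List.dedup kv.2 := by rw [PySem.List.mem_dedup]; exact h
      rw [keysFor_cons_mem kv rest c h, if_pos hm]
      simp
    · have hm : c ∉ PySem.List.dedup kv.2 := by rw [PySem.List.mem_dedup]; exact h
      rw [keysFor_cons_not_mem kv rest c h, if_neg hm]
      simp

-- the two per-word steps agree, hence the two counting folds build the same dict
theorem counts_eq (sentence : String) (lexicon : List (String × List String)) :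
    (PySem.Str.split₀ sentence).foldl
      (fun (d : PySem.Dict String Int) w => lexicon.foldl
        (fun d kv =>
          if PySem.Set.contains (PySem.Set.ofList kv.2) w then d.modify kv.1 0 (· + 1) else d)
        d)
      PySem.Dict.empty
    = (PySem.Str.split₀ sentence).foldl
        (fun (d : PySem.Dict String Int) w =>
          ((lexicon.foldl
              (fun idx kv =>
                (PySem.List.dedup kv.2).foldl (fun idx w => idx.modify w [] (· ++ [kv.1])) idx)
              PySem.Dict.empty).getD w []).foldl
            (fun d k => d.insert k (d.getD k 0 + 1)) d)
        PySem.Dict.empty := by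
  have hstep :
      (fun (d : PySem.Dict String Int) w => lexicon.foldl
        (fun d kv =>
          if PySem.Set.contains (PySem.Set.ofList kv.2) w then d.modify kv.1 0 (· + 1) else d)
        d)
      = (fun (d : PySem.Dict String Int) w =>
          ((lexicon.foldl
              (fun idx kv =>
                (PySem.List.dedup kv.2).foldl (fun idx w => idx.modify w [] (· ++ [kv.1])) idx)
              PySem.Dict.empty).getD w []).foldl
            (fun d k => d.insert k (d.getD k 0 + 1)) d) := by
    funext d w
    rw [foldA_eq_keysFor, getD_index, PySem.Dict.getD_empty, List.nil_append]
    rfl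
  rw [hstep]

-- "if values: return max(values) else 0" agrees with max(values, default=0)
theorem max_default_eq (vals : List Int) :
    (if vals ≠ [] then (PySem.List.max? vals (fun x => x)).getD 0 else 0)
    = PySem.List.maxD vals (fun x => x) 0 := by
  by_cases h : vals = []
  · subst h; rfl
  · rw [if_pos h]; rfl

-- ===== VERDICT (by name: the statement is the Claim_ definition above) =====
theorem sentence_strength_spec : Claim_equal_sentence_strength := by
  intro sentence lexicon _
  show sentence_strength sentence lexicon = sentence_strength_alt sentence lexicon
  simp only [sentence_strength, sentence_strength_alt]
  rw [counts_eq]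
  exact max_default_eq _
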